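-- pv_equiv track=rewrite | github.com/GitMonsters/octotetrahedral-agi | re_arc_bench_solves/235b16b1.py | transform
-- ===== SOURCE A (Python) =====
-- def transform(grid):
--     height = len(grid)
--     width = len(grid[0])
--
--     # Determine background color (most common value)
--     from collections import Counter
--     flat = [cell for row in grid for cell in row]
--     bg = Counter(flat).most_common(1)[0][0]
--
--     # Initialize 3x3 output with background
--     output = [[bg for _ in range(3)] for _ in range(3)]
--
--     # For each non-background pixel, determine which 3x3 region it belongs to
--     for r in range(height):
--         for c in range(width):
--             if grid[r][c] != bg:
--                 # Map to 3x3 output cell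
--                 out_r = r * 3 // height
--                 out_c = c * 3 // width
--                 output[out_r][out_c] = grid[r][c]
--
--     return output
-- ===== SOURCE B (Python) =====
-- def block_last(grid, bg, r0, r1, c0, c1):
--     # last non-background pixel of the block [r0,r1) x [c0,c1), row-major; bg if none
--     val = bg
--     for r in range(r0, r1):
--         for c in range(c0, c1):
--             if grid[r][c] != bg:
--                 val = grid[r][c]
--     return val
--
--
-- def transform(grid):
--     height = len(grid)
--     width = len(grid[0])
--
--     # Determine background color (most common value)
--     from collections import Counter
--     flat = [cell for row in grid for cell in row]
--     bg = Counter(flat).most_common(1)[0][0]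
--
--     # Build each of the 9 output cells independently by scanning its own block of the grid.
--     output = []
--     for i in range(3):
--         r0 = (i * height + 2) // 3          # ceil(i*height/3)
--         r1 = ((i + 1) * height + 2) // 3    # ceil((i+1)*height/3)
--         row_out = []
--         for j in range(3):
--             c0 = (j * width + 2) // 3
--             c1 = ((j + 1) * width + 2) // 3
--             row_out.append(block_last(grid, bg, r0, r1, c0, c1))
--         output.append(row_out)
--     return output
-- ===== Notes on version B (the rewrite author's own statement) =====
-- stated objective: alternative
-- what changed: Instead of A's single flat pass that buckets every non-background pixel into the 3x3 output via r*3//height arithmetic and in-place overwrites, B computes each of the 9 output cells independently by scanning just that cell's block of the grid (row bounds ceil(i*h/3)..ceil((i+1)*h/3), same for columns) and keeping the last non-background pixel; the Counter-based background computation is kept.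
import Mathlib
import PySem

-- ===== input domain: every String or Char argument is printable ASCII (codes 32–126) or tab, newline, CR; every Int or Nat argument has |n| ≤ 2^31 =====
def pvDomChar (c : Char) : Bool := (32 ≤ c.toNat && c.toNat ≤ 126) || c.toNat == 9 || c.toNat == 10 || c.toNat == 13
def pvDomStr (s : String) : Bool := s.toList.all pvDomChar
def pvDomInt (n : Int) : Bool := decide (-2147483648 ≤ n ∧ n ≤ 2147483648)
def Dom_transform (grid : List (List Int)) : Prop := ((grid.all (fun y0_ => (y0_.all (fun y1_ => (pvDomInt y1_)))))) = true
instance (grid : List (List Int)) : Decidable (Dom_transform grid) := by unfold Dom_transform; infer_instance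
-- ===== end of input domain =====

-- B rebuilds the 3x3 result cell by cell, scanning each cell's own block of the grid for its
-- last non-background pixel, instead of A's single flat pass with arithmetic bucketing (objective: alternative).

-- ===== PORT A =====
-- shared with port B (identical lines of Python in both sources): background colour and grid[r][c]
def pyBg (grid : List (List Int)) : Int :=
  match PySem.List.sorted (PySem.Dict.counter grid.flatten).items (fun p => p.2) true with
  | [] => 0          -- unreachable under Pre_ (flat nonempty); Python raises IndexError here
  | p :: _ => p.1

def cellAt (grid : List (List Int)) (r c : Int) : Option Int :=
  match PySem.List.pyGet? grid r with
  | none => none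
  | some row => PySem.List.pyGet? row c

-- output[i][j] = v  (Nat indices; in range under Pre_)
def set2 (o : List (List Int)) (i j : Nat) (v : Int) : List (List Int) :=
  o.set i ((o.getD i []).set j v)

def transform (grid : List (List Int)) : List (List Int) :=
  let height : Int := grid.length
  let width : Int := (((PySem.List.pyGet? grid 0).getD []).length : Int)
  let bg := pyBg grid
  let output := [[bg, bg, bg], [bg, bg, bg], [bg, bg, bg]]
  (PySem.List.pyRange 0 height 1).foldl (fun out r =>
    (PySem.List.pyRange 0 width 1).foldl (fun out c =>
      match cellAt grid r c with
      | none => out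
      | some v =>
        if v ≠ bg then
          set2 out (PySem.Int.floordiv (r * 3) height).toNat
                   (PySem.Int.floordiv (c * 3) width).toNat v
        else out) out) output

-- ===== PORT B =====
-- last non-background pixel of the block [r0,r1) x [c0,c1), row-major; bg if none
def blockLast (grid : List (List Int)) (bg r0 r1 c0 c1 : Int) : Int :=
  (PySem.List.pyRange r0 r1 1).foldl (fun val r =>
    (PySem.List.pyRange c0 c1 1).foldl (fun val c =>
      match cellAt grid r c with
      | none => val
      | some v => if v ≠ bg then v else val) val) bg

def transform_alt (grid : List (List Int)) : List (List Int) :=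
  let height : Int := grid.length
  let width : Int := (((PySem.List.pyGet? grid 0).getD []).length : Int)
  let bg := pyBg grid
  (PySem.List.pyRange 0 3 1).foldl (fun out i =>
    let r0 := PySem.Int.floordiv (i * height + 2) 3
    let r1 := PySem.Int.floordiv ((i + 1) * height + 2) 3
    out ++ [(PySem.List.pyRange 0 3 1).foldl (fun orow j =>
      let c0 := PySem.Int.floordiv (j * width + 2) 3
      let c1 := PySem.Int.floordiv ((j + 1) * width + 2) 3
      orow ++ [blockLast grid bg r0 r1 c0 c1]) []]) []

-- ===== PRECONDITION & SPEC =====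
-- Pre_ is exactly where the Python A returns: some cell exists (else Counter(...).most_common(1)[0]
-- raises IndexError, as does grid[0] on an empty grid), and no row is shorter than row 0 (else grid[r][c] raises).
def Pre_transform (grid : List (List Int)) : Prop :=
  grid.flatten ≠ [] ∧ ∀ row ∈ grid, (grid.headD []).length ≤ row.length
instance (grid : List (List Int)) : Decidable (Pre_transform grid) := by unfold Pre_transform; infer_instance

def pvWitness_transform : List (List Int) := [[1, 2, 2], [2, 2, 2]]

def Spec_transform (grid : List (List Int)) (out : List (List Int)) : Prop := out = transform_alt grid
instance (grid : List (List Int)) (out : List (List Int)) : Decidable (Spec_transform grid out) := by unfold Spec_transform; infer_instance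

-- ===== CLAIM (what is proved, stated in full; the proofs are below) =====
def Claim_equal_transform : Prop := ∀ (grid : List (List Int)), Dom_transform grid → Pre_transform grid → Spec_transform grid (transform grid)

-- ===== LEMMAS AND PROOFS =====

def shape3 (o : List (List Int)) : Prop := o.length = 3 ∧ ∀ row ∈ o, row.length = 3

def get2 (o : List (List Int)) (i j : Nat) : Int := (o.getD i []).getD j 0

theorem getD_set {α : Type} (l : List α) (n m : Nat) (a d : α) :
    (l.set n a).getD m d = if n = m ∧ n < l.length then a else l.getD m d := by
  simp only [List.getD_eq_getElem?_getD, List.getElem?_set]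
  by_cases h1 : n = m
  · subst h1
    by_cases h2 : n < l.length
    · simp [h2]
    · have h3 : l.length ≤ n := by omega
      simp [h2]
  · simp [h1]

theorem row_len {o : List (List Int)} (h : shape3 o) {i : Nat} (hi : i < 3) :
    (o.getD i []).length = 3 := by
  obtain ⟨h1, h2⟩ := h
  have hlt : i < o.length := by omega
  simp [List.getD_eq_getElem?_getD, List.getElem?_eq_getElem hlt, h2 _ (o.getElem_mem hlt)]

theorem shape3_set2 {o : List (List Int)} (h : shape3 o) {i : Nat} (j : Nat) (v : Int)
    (hi : i < 3) : shape3 (set2 o i j v) := by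
  refine ⟨by simp [set2, h.1], ?_⟩
  intro row hrow
  rcases List.mem_or_eq_of_mem_set hrow with hm | hm
  · exact h.2 row hm
  · subst hm
    rw [List.length_set]
    exact row_len h hi

theorem get2_set2 {o : List (List Int)} (h : shape3 o) {i' j' i j : Nat} (v : Int)
    (hi' : i' < 3) (hj' : j' < 3) :
    get2 (set2 o i' j' v) i j = if i' = i ∧ j' = j then v else get2 o i j := by
  unfold get2 set2
  rw [getD_set]
  by_cases hii : i' = i
  · subst hii
    simp only [true_and, h.1, hi', and_true, if_true, if_pos rfl]
    rw [getD_set]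
    have hr : (o.getD i' []).length = 3 := row_len h hi'
    simp only [List.getD_eq_getElem?_getD] at hr
    simp [hr, hj']
  · simp [hii]


theorem pyRange_one_nil {a b : Int} (h : b ≤ a) : PySem.List.pyRange a b 1 = [] := by
  rw [PySem.List.pyRange_one]
  have : (b - a).toNat = 0 := by omega
  simp [this]

theorem filter_pyRange_one : ∀ (n : Nat) (a b lo hi : Int), a ≤ lo → hi ≤ b → (b - a).toNat = n →
    (PySem.List.pyRange a b 1).filter (fun r => decide (lo ≤ r ∧ r < hi)) = PySem.List.pyRange lo hi 1 := by
  intro n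
  induction n with
  | zero =>
    intro a b lo hi h1 h2 hn
    rw [pyRange_one_nil (by omega), pyRange_one_nil (by omega)]
    rfl
  | succ n ih =>
    intro a b lo hi h1 h2 hn
    have hab : a < b := by omega
    rw [PySem.List.pyRange_one_cons hab, List.filter_cons]
    by_cases hc : lo ≤ a ∧ a < hi
    · have ha : a = lo := by omega
      have hct : decide (lo ≤ a ∧ a < hi) = true := by simpa using hc
      rw [hct]
      rw [List.filter_congr (q := fun r => decide (lo + 1 ≤ r ∧ r < hi))
        (fun r hr => by
          have := (PySem.List.mem_pyRange_one).mp hr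
          simp only [decide_eq_decide]
          omega)]
      rw [ih (a + 1) b (lo + 1) hi (by omega) h2 (by omega)]
      rw [ha, ← PySem.List.pyRange_one_cons (by omega)]
      simp
    · simp only [decide_eq_true_eq, hc, if_false]
      by_cases hlo : a < lo
      · exact ih (a + 1) b lo hi (by omega) h2 (by omega)
      · have hhi : hi ≤ lo := by omega
        rw [pyRange_one_nil hhi, List.filter_eq_nil_iff]
        intro r _
        simp only [decide_eq_true_eq]
        omega

theorem filter_pyRange_one' (a b lo hi : Int) (h1 : a ≤ lo) (h2 : hi ≤ b) :
    (PySem.List.pyRange a b 1).filter (fun r => decide (lo ≤ r ∧ r < hi)) = PySem.List.pyRange lo hi 1 :=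
  filter_pyRange_one (b - a).toNat a b lo hi h1 h2 rfl

theorem innerA (grid : List (List Int)) (bg : Int) (hI wI : Int) (r : Int) (i j : Nat)
    (hi : i < 3) (hj : j < 3)
    (hr0 : 0 ≤ r) (hr1 : r < hI) :
    ∀ (M : List Int) (o : List (List Int)), shape3 o → (∀ c ∈ M, 0 ≤ c ∧ c < wI) →
    shape3 (M.foldl (fun out c => match cellAt grid r c with
        | none => out
        | some v => if v ≠ bg then
            set2 out (PySem.Int.floordiv (r * 3) hI).toNat (PySem.Int.floordiv (c * 3) wI).toNat v
          else out) o)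
    ∧ get2 (M.foldl (fun out c => match cellAt grid r c with
        | none => out
        | some v => if v ≠ bg then
            set2 out (PySem.Int.floordiv (r * 3) hI).toNat (PySem.Int.floordiv (c * 3) wI).toNat v
          else out) o) i j
      = M.foldl (fun acc c => match cellAt grid r c with
        | none => acc
        | some v => if v ≠ bg ∧ (PySem.Int.floordiv (r * 3) hI).toNat = i ∧ (PySem.Int.floordiv (c * 3) wI).toNat = j then v else acc) (get2 o i j) := by
  intro M
  induction M with
  | nil => intro o ho _; exact ⟨ho, rfl⟩
  | cons c M ih =>
    intro o ho hM
    have hc := hM c (by simp)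
    have hri : (PySem.Int.floordiv (r * 3) hI).toNat < 3 := by
      have h1 : PySem.Int.floordiv (r * 3) hI < 3 :=
        (PySem.Int.floordiv_lt_iff_lt_mul (by omega)).mpr (by nlinarith)
      omega
    have hci : (PySem.Int.floordiv (c * 3) wI).toNat < 3 := by
      have h1 : PySem.Int.floordiv (c * 3) wI < 3 :=
        (PySem.Int.floordiv_lt_iff_lt_mul (by omega)).mpr (by nlinarith)
      omega
    simp only [List.foldl_cons]
    cases hcell : cellAt grid r c with
    | none =>
      exact ih o ho (fun c hc => hM c (by simp [hc]))
    | some v =>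
      dsimp only
      by_cases hv : v ≠ bg
      · rw [if_pos hv]
        obtain ⟨ha, hb⟩ := ih (set2 o _ _ v) (shape3_set2 ho _ v hri) (fun c hc => hM c (by simp [hc]))
        refine ⟨ha, ?_⟩
        rw [hb, get2_set2 ho v hri hci]
        congr 1
        simp [hv]
      · rw [if_neg hv]
        obtain ⟨ha, hb⟩ := ih o ho (fun c hc => hM c (by simp [hc]))
        refine ⟨ha, ?_⟩
        rw [hb]
        congr 1
        simp at hv
        simp [hv]

theorem outerA (grid : List (List Int)) (bg hI wI : Int) (i j : Nat)
    (hi : i < 3) (hj : j < 3) :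
    ∀ (L : List Int) (o : List (List Int)), shape3 o → (∀ r ∈ L, 0 ≤ r ∧ r < hI) →
    shape3 (L.foldl (fun out r => (PySem.List.pyRange 0 wI 1).foldl (fun out c =>
        match cellAt grid r c with
        | none => out
        | some v => if v ≠ bg then
            set2 out (PySem.Int.floordiv (r * 3) hI).toNat (PySem.Int.floordiv (c * 3) wI).toNat v
          else out) out) o)
    ∧ get2 (L.foldl (fun out r => (PySem.List.pyRange 0 wI 1).foldl (fun out c =>
        match cellAt grid r c with
        | none => out
        | some v => if v ≠ bg then
            set2 out (PySem.Int.floordiv (r * 3) hI).toNat (PySem.Int.floordiv (c * 3) wI).toNat v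
          else out) out) o) i j
      = L.foldl (fun acc r => (PySem.List.pyRange 0 wI 1).foldl (fun acc c =>
        match cellAt grid r c with
        | none => acc
        | some v => if v ≠ bg ∧ (PySem.Int.floordiv (r * 3) hI).toNat = i ∧ (PySem.Int.floordiv (c * 3) wI).toNat = j then v else acc) acc) (get2 o i j) := by
  intro L
  induction L with
  | nil => intro o ho _; exact ⟨ho, rfl⟩
  | cons r L ih =>
    intro o ho hL
    have hr := hL r (by simp)
    have hMb : ∀ c ∈ PySem.List.pyRange 0 wI 1, 0 ≤ c ∧ c < wI := by
      intro c hc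
      exact (PySem.List.mem_pyRange_one).mp hc
    obtain ⟨ha, hb⟩ := innerA grid bg hI wI r i j hi hj hr.1 hr.2 (PySem.List.pyRange 0 wI 1) o ho hMb
    simp only [List.foldl_cons]
    obtain ⟨hc, hd⟩ := ih _ ha (fun r hrm => hL r (by simp [hrm]))
    exact ⟨hc, by rw [hd, hb]⟩

theorem rowCond (hI : Int) (i : Int) (hi : 0 ≤ i ∧ i < 3) (hh : 0 < hI) (r : Int)
    (hr : 0 ≤ r ∧ r < hI) :
    ((PySem.Int.floordiv (r * 3) hI).toNat = i.toNat)
      ↔ (PySem.Int.floordiv (i * hI + 2) 3 ≤ r ∧ r < PySem.Int.floordiv ((i + 1) * hI + 2) 3) := by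
  have hb0 : 0 ≤ PySem.Int.floordiv (r * 3) hI :=
    (PySem.Int.le_floordiv_iff_mul_le hh).mpr (by nlinarith)
  have hb1 : PySem.Int.floordiv (r * 3) hI < 3 :=
    (PySem.Int.floordiv_lt_iff_lt_mul hh).mpr (by nlinarith)
  have heq : (PySem.Int.floordiv (r * 3) hI).toNat = i.toNat ↔ PySem.Int.floordiv (r * 3) hI = i := by
    omega
  rw [heq, PySem.Int.floordiv_eq_iff_of_pos hh,
    PySem.Int.floordiv_eq_ediv_of_pos (a := i * hI + 2) (by omega),
    PySem.Int.floordiv_eq_ediv_of_pos (a := (i + 1) * hI + 2) (by omega)]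
  have h1 : (i + 1) * hI = i * hI + hI := by ring
  rw [h1]
  generalize i * hI = a
  omega

theorem cellBridge (grid : List (List Int)) (bg hI wI : Int) (i j : Int)
    (hi : 0 ≤ i ∧ i < 3) (hj : 0 ≤ j ∧ j < 3) (hh : 0 < hI) (hw : 0 ≤ wI) :
    (PySem.List.pyRange 0 hI 1).foldl (fun acc r => (PySem.List.pyRange 0 wI 1).foldl (fun acc c =>
        match cellAt grid r c with
        | none => acc
        | some v => if v ≠ bg ∧ (PySem.Int.floordiv (r * 3) hI).toNat = i.toNat ∧ (PySem.Int.floordiv (c * 3) wI).toNat = j.toNat then v else acc) acc) bg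
    = blockLast grid bg (PySem.Int.floordiv (i * hI + 2) 3) (PySem.Int.floordiv ((i + 1) * hI + 2) 3)
        (PySem.Int.floordiv (j * wI + 2) 3) (PySem.Int.floordiv ((j + 1) * wI + 2) 3) := by
  have houter : ∀ (acc : Int) (r : Int), r ∈ PySem.List.pyRange 0 hI 1 →
      (PySem.List.pyRange 0 wI 1).foldl (fun acc c =>
        match cellAt grid r c with
        | none => acc
        | some v => if v ≠ bg ∧ (PySem.Int.floordiv (r * 3) hI).toNat = i.toNat ∧ (PySem.Int.floordiv (c * 3) wI).toNat = j.toNat then v else acc) acc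
      = if PySem.Int.floordiv (i * hI + 2) 3 ≤ r ∧ r < PySem.Int.floordiv ((i + 1) * hI + 2) 3 then
          (PySem.List.pyRange (PySem.Int.floordiv (j * wI + 2) 3) (PySem.Int.floordiv ((j + 1) * wI + 2) 3) 1).foldl (fun acc c =>
            match cellAt grid r c with
            | none => acc
            | some v => if v ≠ bg then v else acc) acc
        else acc := by
    intro acc r hrm
    have hrb := (PySem.List.mem_pyRange_one).mp hrm
    by_cases hrc : PySem.Int.floordiv (i * hI + 2) 3 ≤ r ∧ r < PySem.Int.floordiv ((i + 1) * hI + 2) 3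
    · rw [if_pos hrc]
      have hrcond : (PySem.Int.floordiv (r * 3) hI).toNat = i.toNat :=
        (rowCond hI i hi hh r hrb).mpr hrc
      rw [PySem.List.foldl_congr_mem _ _ (fun acc c =>
          if PySem.Int.floordiv (j * wI + 2) 3 ≤ c ∧ c < PySem.Int.floordiv ((j + 1) * wI + 2) 3 then
            (match cellAt grid r c with
             | none => acc
             | some v => if v ≠ bg then v else acc)
          else acc) _
        (by
          intro acc c hcm
          have hcb := (PySem.List.mem_pyRange_one).mp hcm
          have hwpos : 0 < wI := by omega
          have hccond := rowCond wI j hj hwpos c hcb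
          cases hcell : cellAt grid r c with
          | none => simp only [hcell]; split_ifs <;> rfl
          | some v =>
            simp only [hcell]
            by_cases hcc : PySem.Int.floordiv (j * wI + 2) 3 ≤ c ∧ c < PySem.Int.floordiv ((j + 1) * wI + 2) 3
            · rw [if_pos hcc]
              have : (PySem.Int.floordiv (c * 3) wI).toNat = j.toNat := hccond.mpr hcc
              simp [hrcond, this]
            · rw [if_neg hcc]
              have : ¬ (PySem.Int.floordiv (c * 3) wI).toNat = j.toNat := fun hx => hcc (hccond.mp hx)
              simp [this])]
      rw [PySem.List.foldl_ite_eq_foldl_filter]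
      have ha0 : 0 ≤ j * wI := mul_nonneg hj.1 hw
      have ha2 : j * wI ≤ 2 * wI := by nlinarith
      have hjj : (j + 1) * wI = j * wI + wI := by ring
      rw [filter_pyRange_one' 0 wI _ _
        (by
          rw [PySem.Int.floordiv_eq_ediv_of_pos (by omega)]
          omega)
        (by
          rw [PySem.Int.floordiv_eq_ediv_of_pos (by omega), hjj]
          generalize j * wI = a at ha0 ha2
          omega)]
    · rw [if_neg hrc]
      have hno : ¬ (PySem.Int.floordiv (r * 3) hI).toNat = i.toNat :=
        fun hx => hrc ((rowCond hI i hi hh r hrb).mp hx)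
      rw [PySem.List.foldl_congr_mem _ _ (fun acc _ => acc) _
        (by
          intro acc c _
          cases hcell : cellAt grid r c with
          | none => simp only [hcell]
          | some v => simp only [hcell]; simp [hno])]
      exact PySem.List.foldl_ignore _ _
  rw [PySem.List.foldl_congr_mem _ _ _ _ houter, PySem.List.foldl_ite_eq_foldl_filter]
  have ha0 : 0 ≤ i * hI := mul_nonneg hi.1 (by omega)
  have ha2 : i * hI ≤ 2 * hI := by nlinarith
  have hii : (i + 1) * hI = i * hI + hI := by ring
  rw [filter_pyRange_one' 0 hI _ _
    (by
      rw [PySem.Int.floordiv_eq_ediv_of_pos (by omega)]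
      omega)
    (by
      rw [PySem.Int.floordiv_eq_ediv_of_pos (by omega), hii]
      generalize i * hI = a at ha0 ha2
      omega)]
  rfl

theorem shape3_eq {o : List (List Int)} (h : shape3 o) :
    o = [[get2 o 0 0, get2 o 0 1, get2 o 0 2],
         [get2 o 1 0, get2 o 1 1, get2 o 1 2],
         [get2 o 2 0, get2 o 2 1, get2 o 2 2]] := by
  obtain ⟨r1, r2, r3, rfl⟩ := List.length_eq_three.mp h.1
  obtain ⟨a, b, c, h1⟩ := List.length_eq_three.mp (h.2 r1 (by simp))
  obtain ⟨d, e, f, h2⟩ := List.length_eq_three.mp (h.2 r2 (by simp))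
  obtain ⟨g, k, m, h3⟩ := List.length_eq_three.mp (h.2 r3 (by simp))
  subst h1 h2 h3
  rfl

theorem transform_ok (grid : List (List Int)) (hpre : grid.flatten ≠ []) :
    transform grid = transform_alt grid := by
  have hne : grid ≠ [] := by rintro rfl; simp at hpre
  have hh : 0 < ((grid.length : Int)) := by
    have := List.length_pos_iff.mpr hne
    omega
  have hw : (0 : Int) ≤ (((PySem.List.pyGet? grid 0).getD []).length : Int) := by omega
  have hinit : shape3 [[pyBg grid, pyBg grid, pyBg grid], [pyBg grid, pyBg grid, pyBg grid],
      [pyBg grid, pyBg grid, pyBg grid]] := by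
    refine ⟨rfl, ?_⟩
    intro row hrow
    simp only [List.mem_cons, List.not_mem_nil, or_false] at hrow
    rcases hrow with h | h | h <;> subst h <;> rfl
  have hbnd : ∀ r ∈ PySem.List.pyRange 0 (grid.length : Int) 1, 0 ≤ r ∧ r < (grid.length : Int) := by
    intro r hr
    exact (PySem.List.mem_pyRange_one).mp hr
  have key : ∀ i j : Int, 0 ≤ i ∧ i < 3 → 0 ≤ j ∧ j < 3 →
      get2 (transform grid) i.toNat j.toNat
        = blockLast grid (pyBg grid)
            (PySem.Int.floordiv (i * (grid.length : Int) + 2) 3)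
            (PySem.Int.floordiv ((i + 1) * (grid.length : Int) + 2) 3)
            (PySem.Int.floordiv (j * (((PySem.List.pyGet? grid 0).getD []).length : Int) + 2) 3)
            (PySem.Int.floordiv ((j + 1) * (((PySem.List.pyGet? grid 0).getD []).length : Int) + 2) 3) := by
    intro i j hi hj
    have h1 := (outerA grid (pyBg grid) (grid.length : Int) (((PySem.List.pyGet? grid 0).getD []).length : Int)
      i.toNat j.toNat (by omega) (by omega)
      (PySem.List.pyRange 0 (grid.length : Int) 1) _ hinit hbnd).2
    have h2 := cellBridge grid (pyBg grid) (grid.length : Int) (((PySem.List.pyGet? grid 0).getD []).length : Int)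
      i j hi hj hh hw
    have hbg : get2 [[pyBg grid, pyBg grid, pyBg grid], [pyBg grid, pyBg grid, pyBg grid],
        [pyBg grid, pyBg grid, pyBg grid]] i.toNat j.toNat = pyBg grid := by
      obtain ⟨hi1, hi2⟩ := hi
      obtain ⟨hj1, hj2⟩ := hj
      unfold get2
      interval_cases i <;> interval_cases j <;> rfl
    rw [hbg] at h1
    exact h1.trans h2
  have hshape : shape3 (transform grid) :=
    (outerA grid (pyBg grid) (grid.length : Int) (((PySem.List.pyGet? grid 0).getD []).length : Int) 0 0 (by omega) (by omega)
      (PySem.List.pyRange 0 (grid.length : Int) 1) _ hinit hbnd).1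
  have hB : transform_alt grid =
      [[blockLast grid (pyBg grid)
        (PySem.Int.floordiv (0 * (grid.length : Int) + 2) 3)
        (PySem.Int.floordiv ((0 + 1) * (grid.length : Int) + 2) 3)
        (PySem.Int.floordiv (0 * (((PySem.List.pyGet? grid 0).getD []).length : Int) + 2) 3)
        (PySem.Int.floordiv ((0 + 1) * (((PySem.List.pyGet? grid 0).getD []).length : Int) + 2) 3),
        blockLast grid (pyBg grid)
        (PySem.Int.floordiv (0 * (grid.length : Int) + 2) 3)
        (PySem.Int.floordiv ((0 + 1) * (grid.length : Int) + 2) 3)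
        (PySem.Int.floordiv (1 * (((PySem.List.pyGet? grid 0).getD []).length : Int) + 2) 3)
        (PySem.Int.floordiv ((1 + 1) * (((PySem.List.pyGet? grid 0).getD []).length : Int) + 2) 3),
        blockLast grid (pyBg grid)
        (PySem.Int.floordiv (0 * (grid.length : Int) + 2) 3)
        (PySem.Int.floordiv ((0 + 1) * (grid.length : Int) + 2) 3)
        (PySem.Int.floordiv (2 * (((PySem.List.pyGet? grid 0).getD []).length : Int) + 2) 3)
        (PySem.Int.floordiv ((2 + 1) * (((PySem.List.pyGet? grid 0).getD []).length : Int) + 2) 3)],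
       [blockLast grid (pyBg grid)
        (PySem.Int.floordiv (1 * (grid.length : Int) + 2) 3)
        (PySem.Int.floordiv ((1 + 1) * (grid.length : Int) + 2) 3)
        (PySem.Int.floordiv (0 * (((PySem.List.pyGet? grid 0).getD []).length : Int) + 2) 3)
        (PySem.Int.floordiv ((0 + 1) * (((PySem.List.pyGet? grid 0).getD []).length : Int) + 2) 3),
        blockLast grid (pyBg grid)
        (PySem.Int.floordiv (1 * (grid.length : Int) + 2) 3)
        (PySem.Int.floordiv ((1 + 1) * (grid.length : Int) + 2) 3)
        (PySem.Int.floordiv (1 * (((PySem.List.pyGet? grid 0).getD []).length : Int) + 2) 3)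
        (PySem.Int.floordiv ((1 + 1) * (((PySem.List.pyGet? grid 0).getD []).length : Int) + 2) 3),
        blockLast grid (pyBg grid)
        (PySem.Int.floordiv (1 * (grid.length : Int) + 2) 3)
        (PySem.Int.floordiv ((1 + 1) * (grid.length : Int) + 2) 3)
        (PySem.Int.floordiv (2 * (((PySem.List.pyGet? grid 0).getD []).length : Int) + 2) 3)
        (PySem.Int.floordiv ((2 + 1) * (((PySem.List.pyGet? grid 0).getD []).length : Int) + 2) 3)],
       [blockLast grid (pyBg grid)
        (PySem.Int.floordiv (2 * (grid.length : Int) + 2) 3)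
        (PySem.Int.floordiv ((2 + 1) * (grid.length : Int) + 2) 3)
        (PySem.Int.floordiv (0 * (((PySem.List.pyGet? grid 0).getD []).length : Int) + 2) 3)
        (PySem.Int.floordiv ((0 + 1) * (((PySem.List.pyGet? grid 0).getD []).length : Int) + 2) 3),
        blockLast grid (pyBg grid)
        (PySem.Int.floordiv (2 * (grid.length : Int) + 2) 3)
        (PySem.Int.floordiv ((2 + 1) * (grid.length : Int) + 2) 3)
        (PySem.Int.floordiv (1 * (((PySem.List.pyGet? grid 0).getD []).length : Int) + 2) 3)
        (PySem.Int.floordiv ((1 + 1) * (((PySem.List.pyGet? grid 0).getD []).length : Int) + 2) 3),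
        blockLast grid (pyBg grid)
        (PySem.Int.floordiv (2 * (grid.length : Int) + 2) 3)
        (PySem.Int.floordiv ((2 + 1) * (grid.length : Int) + 2) 3)
        (PySem.Int.floordiv (2 * (((PySem.List.pyGet? grid 0).getD []).length : Int) + 2) 3)
        (PySem.Int.floordiv ((2 + 1) * (((PySem.List.pyGet? grid 0).getD []).length : Int) + 2) 3)]] := rfl
  rw [shape3_eq hshape, hB]
  rw [show get2 (transform grid) 0 0 = blockLast grid (pyBg grid)
        (PySem.Int.floordiv (0 * (grid.length : Int) + 2) 3)
        (PySem.Int.floordiv ((0 + 1) * (grid.length : Int) + 2) 3)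
        (PySem.Int.floordiv (0 * (((PySem.List.pyGet? grid 0).getD []).length : Int) + 2) 3)
        (PySem.Int.floordiv ((0 + 1) * (((PySem.List.pyGet? grid 0).getD []).length : Int) + 2) 3) from key 0 0 ⟨by norm_num, by norm_num⟩ ⟨by norm_num, by norm_num⟩]
  rw [show get2 (transform grid) 0 1 = blockLast grid (pyBg grid)
        (PySem.Int.floordiv (0 * (grid.length : Int) + 2) 3)
        (PySem.Int.floordiv ((0 + 1) * (grid.length : Int) + 2) 3)
        (PySem.Int.floordiv (1 * (((PySem.List.pyGet? grid 0).getD []).length : Int) + 2) 3)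
        (PySem.Int.floordiv ((1 + 1) * (((PySem.List.pyGet? grid 0).getD []).length : Int) + 2) 3) from key 0 1 ⟨by norm_num, by norm_num⟩ ⟨by norm_num, by norm_num⟩]
  rw [show get2 (transform grid) 0 2 = blockLast grid (pyBg grid)
        (PySem.Int.floordiv (0 * (grid.length : Int) + 2) 3)
        (PySem.Int.floordiv ((0 + 1) * (grid.length : Int) + 2) 3)
        (PySem.Int.floordiv (2 * (((PySem.List.pyGet? grid 0).getD []).length : Int) + 2) 3)
        (PySem.Int.floordiv ((2 + 1) * (((PySem.List.pyGet? grid 0).getD []).length : Int) + 2) 3) from key 0 2 ⟨by norm_num, by norm_num⟩ ⟨by norm_num, by norm_num⟩]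
  rw [show get2 (transform grid) 1 0 = blockLast grid (pyBg grid)
        (PySem.Int.floordiv (1 * (grid.length : Int) + 2) 3)
        (PySem.Int.floordiv ((1 + 1) * (grid.length : Int) + 2) 3)
        (PySem.Int.floordiv (0 * (((PySem.List.pyGet? grid 0).getD []).length : Int) + 2) 3)
        (PySem.Int.floordiv ((0 + 1) * (((PySem.List.pyGet? grid 0).getD []).length : Int) + 2) 3) from key 1 0 ⟨by norm_num, by norm_num⟩ ⟨by norm_num, by norm_num⟩]
  rw [show get2 (transform grid) 1 1 = blockLast grid (pyBg grid)
        (PySem.Int.floordiv (1 * (grid.length : Int) + 2) 3)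
        (PySem.Int.floordiv ((1 + 1) * (grid.length : Int) + 2) 3)
        (PySem.Int.floordiv (1 * (((PySem.List.pyGet? grid 0).getD []).length : Int) + 2) 3)
        (PySem.Int.floordiv ((1 + 1) * (((PySem.List.pyGet? grid 0).getD []).length : Int) + 2) 3) from key 1 1 ⟨by norm_num, by norm_num⟩ ⟨by norm_num, by norm_num⟩]
  rw [show get2 (transform grid) 1 2 = blockLast grid (pyBg grid)
        (PySem.Int.floordiv (1 * (grid.length : Int) + 2) 3)
        (PySem.Int.floordiv ((1 + 1) * (grid.length : Int) + 2) 3)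
        (PySem.Int.floordiv (2 * (((PySem.List.pyGet? grid 0).getD []).length : Int) + 2) 3)
        (PySem.Int.floordiv ((2 + 1) * (((PySem.List.pyGet? grid 0).getD []).length : Int) + 2) 3) from key 1 2 ⟨by norm_num, by norm_num⟩ ⟨by norm_num, by norm_num⟩]
  rw [show get2 (transform grid) 2 0 = blockLast grid (pyBg grid)
        (PySem.Int.floordiv (2 * (grid.length : Int) + 2) 3)
        (PySem.Int.floordiv ((2 + 1) * (grid.length : Int) + 2) 3)
        (PySem.Int.floordiv (0 * (((PySem.List.pyGet? grid 0).getD []).length : Int) + 2) 3)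
        (PySem.Int.floordiv ((0 + 1) * (((PySem.List.pyGet? grid 0).getD []).length : Int) + 2) 3) from key 2 0 ⟨by norm_num, by norm_num⟩ ⟨by norm_num, by norm_num⟩]
  rw [show get2 (transform grid) 2 1 = blockLast grid (pyBg grid)
        (PySem.Int.floordiv (2 * (grid.length : Int) + 2) 3)
        (PySem.Int.floordiv ((2 + 1) * (grid.length : Int) + 2) 3)
        (PySem.Int.floordiv (1 * (((PySem.List.pyGet? grid 0).getD []).length : Int) + 2) 3)
        (PySem.Int.floordiv ((1 + 1) * (((PySem.List.pyGet? grid 0).getD []).length : Int) + 2) 3) from key 2 1 ⟨by norm_num, by norm_num⟩ ⟨by norm_num, by norm_num⟩]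
  rw [show get2 (transform grid) 2 2 = blockLast grid (pyBg grid)
        (PySem.Int.floordiv (2 * (grid.length : Int) + 2) 3)
        (PySem.Int.floordiv ((2 + 1) * (grid.length : Int) + 2) 3)
        (PySem.Int.floordiv (2 * (((PySem.List.pyGet? grid 0).getD []).length : Int) + 2) 3)
        (PySem.Int.floordiv ((2 + 1) * (((PySem.List.pyGet? grid 0).getD []).length : Int) + 2) 3) from key 2 2 ⟨by norm_num, by norm_num⟩ ⟨by norm_num, by norm_num⟩]

-- ===== VERDICT (by name: the statement is the Claim_ definition above) =====
theorem transform_spec : Claim_equal_transform := by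
  intro grid _ hpre
  unfold Spec_transform
  exact transform_ok grid hpre.1
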